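-- pv_equiv track=rewrite | github.com/yil384/PettingLLMs | pettingllms/trainer/utils.py | agent_sample_rollouts
-- ===== SOURCE A (Python) =====
-- from math import prod
-- from typing import List, Dict, Iterator, Tuple, Optional
--
-- def compute_strides(sizes: List[int]) -> List[int]:
--     """Row-major（最后一维变化最快）的stride。"""
--     n = len(sizes)
--     strides = [1] * n
--     for i in range(n - 2, -1, -1):
--         strides[i] = strides[i + 1] * sizes[i + 1]
--     return strides
--
-- def agent_sample_rollouts(
--     agent_idx: int, sample_idx: int, sizes: List[int]
-- ) :
--     strides = compute_strides(sizes)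
--     stride = strides[agent_idx]         # block_len
--     period = sizes[agent_idx] * stride
--     total = prod(sizes)
--     result=[]
--
--     for base in range(0, total, period):
--         start = base + sample_idx * stride
--
--         for k in range(stride):
--             result.append(start + k)
--     return result
-- ===== SOURCE B (Python) =====
-- from math import prod
--
--
-- def agent_sample_rollouts(agent_idx, sample_idx, sizes):
--     # Depth-first coordinate enumeration: one coordinate axis per dimension, with
--     # the agent's axis replaced by the single fixed coordinate sample_idx; the
--     # flattened index is accumulated as coordinate * suffix-product down the
--     # recursion and emitted at the leaves. An empty axis means an empty product,
--     # so it short-circuits (as itertools.product would).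
--     n = len(sizes)
--     axes = [range(s) for s in sizes]
--     axes[agent_idx] = [sample_idx]
--     out = []
--     if not all(axes):
--         return out
--
--     def emit(j, acc):
--         if j == n:
--             out.append(acc)
--             return
--         st = prod(sizes[j + 1:])
--         for c in axes[j]:
--             emit(j + 1, acc + c * st)
--
--     emit(0, 0)
--     return out
-- ===== Notes on version B (the rewrite author's own statement) =====
-- stated objective: alternative
-- what changed: Replaces A's strides table plus arithmetic base-stepping (range(0, total, period) with an inner offset loop) by a depth-first recursive enumeration of coordinate tuples over every dimension except the agent's (fixed to sample_idx), accumulating coordinate*suffix-product down the recursion and emitting flattened indices at the leaves.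
-- outside the precondition, e.g. on agent_sample_rollouts(0, 0, [1, -2, -3]): A returns [0, 1, 2, 3, 4, 5], B returns []
import Mathlib
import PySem

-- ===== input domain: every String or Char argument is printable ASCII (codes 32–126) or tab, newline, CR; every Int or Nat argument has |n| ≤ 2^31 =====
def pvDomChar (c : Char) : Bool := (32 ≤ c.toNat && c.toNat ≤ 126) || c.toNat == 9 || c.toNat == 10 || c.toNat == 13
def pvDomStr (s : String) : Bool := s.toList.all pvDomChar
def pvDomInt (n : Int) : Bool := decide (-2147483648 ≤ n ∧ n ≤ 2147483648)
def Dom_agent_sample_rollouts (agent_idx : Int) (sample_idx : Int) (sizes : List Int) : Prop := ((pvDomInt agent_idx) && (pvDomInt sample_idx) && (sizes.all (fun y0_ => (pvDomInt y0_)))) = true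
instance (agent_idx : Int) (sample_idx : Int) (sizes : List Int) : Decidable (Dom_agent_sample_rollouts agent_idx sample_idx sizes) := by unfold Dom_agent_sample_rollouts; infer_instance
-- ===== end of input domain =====

-- B replaces A's strides table and arithmetic base-stepping by a depth-first recursive
-- enumeration of coordinate tuples over every dimension except the agent's (objective: alternative).

-- ===== PORT A =====
-- compute_strides: builds [1]*n, then the loop 'for i in range(n-2, -1, -1): strides[i] = strides[i+1]*sizes[i+1]'.
-- All indices i, i+1 produced by the range are in [0, n-1], so pyGetD/pySetD are exact here.
def compute_strides (sizes : List Int) : List Int :=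
  let n := sizes.length
  let strides := List.replicate n (1 : Int)
  (PySem.List.pyRange ((n : Int) - 2) (-1) (-1)).foldl
    (fun st i =>
      PySem.List.pySetD st i (PySem.List.pyGetD st (i + 1) 1 * PySem.List.pyGetD sizes (i + 1) 1))
    strides

-- Python raises IndexError on strides[agent_idx] out of range and ValueError on range step
-- period == 0; both are excluded by Pre_, so the .getD defaults below are never the result.
def agent_sample_rollouts (agent_idx : Int) (sample_idx : Int) (sizes : List Int) : List Int :=
  let strides := compute_strides sizes
  let stride := (PySem.List.pyGet? strides agent_idx).getD 0
  let period := (PySem.List.pyGet? sizes agent_idx).getD 0 * stride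
  let total := sizes.prod
  (PySem.List.pyRange 0 total period).foldl
    (fun result base =>
      let start := base + sample_idx * stride
      (PySem.List.pyRange 0 stride 1).foldl (fun r k => r ++ [start + k]) result)
    []

-- ===== PORT B =====
-- Source B builds one coordinate axis per dimension (axes = [range(s) for s in sizes]),
-- replaces the agent's axis by the single fixed coordinate [sample_idx] (the list
-- assignment axes[agent_idx] = … raises IndexError exactly like A's strides[agent_idx];
-- outside Pre_ pySetD's no-op default is never the claimed value), returns [] at once
-- if some axis is empty ('if not all(axes)'), and otherwise walks the axes depth-first
-- with emit(j, acc), accumulating acc + c * prod(sizes[j+1:]) and appending acc at the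
-- leaves; the list 'out' built by appends in DFS order is this flatMap.
-- an axis is a Python range object 'range(s)' (modelled by its bound, 'some s') or the
-- one-element list holding the agent's fixed coordinate ('none'); like Python's lazy
-- range, it is only expanded into its elements when emit iterates over it
def pvAxisList (a : Option Int) (sample_idx : Int) : List Int :=
  match a with
  | some s => PySem.List.pyRange 0 s 1
  | none => [sample_idx]

-- Python's 'not all(axes)' truthiness test: range(s) is falsy iff s ≤ 0, [sample_idx] never
def pvAxisEmpty (a : Option Int) : Bool :=
  match a with
  | some s => decide (s ≤ 0)
  | none => false

def pvEmit (sample_idx : Int) (axes : List (Option Int)) (sizes : List Int) (j : Nat) (acc : Int) : List Int :=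
  if _hj : j < sizes.length then
    let st := (PySem.List.slice sizes (some ((j : Int) + 1))).prod
    (pvAxisList (axes.getD j (some 0)) sample_idx).flatMap
      (fun c => pvEmit sample_idx axes sizes (j + 1) (acc + c * st))
  else [acc]
termination_by sizes.length - j
decreasing_by all_goals omega

def agent_sample_rollouts_alt (agent_idx : Int) (sample_idx : Int) (sizes : List Int) : List Int :=
  let axes := sizes.map (fun s => some s)
  let axes2 := PySem.List.pySetD axes agent_idx none
  if axes2.any pvAxisEmpty then [] else pvEmit sample_idx axes2 sizes 0 0

-- ===== PRECONDITION & SPEC =====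
-- Pre_ is where Python A returns AND its value is not an accident of sign handling:
-- agent_idx in range (Python's negative wraparound included; outside it A raises
-- IndexError), a nonzero product of the sizes from the wrapped agent position on
-- (otherwise the period is 0 and A's range(0, total, 0) raises ValueError), and either
-- every non-agent size is nonnegative (the meaningful tensor shapes) or a sign
-- condition on the prefix/suffix products forcing both programs to return [].
-- Pre_ DOES exclude some inputs with a negative entry in sizes on which A still returns:
-- sizes are tensor dimension sizes, and the (possibly nonempty, negative-index) blocks
-- A's stepped range emits there are accidental; B naturally returns [] on such input.
def Pre_agent_sample_rollouts (agent_idx : Int) (sample_idx : Int) (sizes : List Int) : Prop :=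
  -(sizes.length : Int) ≤ agent_idx ∧ agent_idx < (sizes.length : Int) ∧
  (sizes.drop ((if agent_idx < 0 then agent_idx + sizes.length else agent_idx).toNat)).prod ≠ 0 ∧
  ((∀ idx ∈ List.range sizes.length,
      idx ≠ (if agent_idx < 0 then agent_idx + sizes.length else agent_idx).toNat →
      0 ≤ sizes.getD idx 1) ∨
   (sizes.drop ((if agent_idx < 0 then agent_idx + sizes.length else agent_idx).toNat + 1)).prod < 0 ∨
   (sizes.take ((if agent_idx < 0 then agent_idx + sizes.length else agent_idx).toNat)).prod ≤ 0)
instance (agent_idx : Int) (sample_idx : Int) (sizes : List Int) : Decidable (Pre_agent_sample_rollouts agent_idx sample_idx sizes) := by unfold Pre_agent_sample_rollouts; infer_instance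

def pvWitness_agent_sample_rollouts : Int × Int × List Int := (1, 2, [2, 3, 4])

def Spec_agent_sample_rollouts (agent_idx : Int) (sample_idx : Int) (sizes : List Int) (out : List Int) : Prop := out = agent_sample_rollouts_alt agent_idx sample_idx sizes
instance (agent_idx : Int) (sample_idx : Int) (sizes : List Int) (out : List Int) : Decidable (Spec_agent_sample_rollouts agent_idx sample_idx sizes out) := by unfold Spec_agent_sample_rollouts; infer_instance

-- ===== CLAIM (what is proved, stated in full; the proofs are below) =====
def Claim_equal_agent_sample_rollouts : Prop := ∀ (agent_idx : Int) (sample_idx : Int) (sizes : List Int), Dom_agent_sample_rollouts agent_idx sample_idx sizes → Pre_agent_sample_rollouts agent_idx sample_idx sizes → Spec_agent_sample_rollouts agent_idx sample_idx sizes (agent_sample_rollouts agent_idx sample_idx sizes)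

-- ===== LEMMAS AND PROOFS =====

-- A's value in this shape: one block per step of the outer range, a map over the inner range
def pvShape (total period stride fix : Int) : List Int :=
  (PySem.List.pyRange 0 total period).flatMap
    (fun base => (PySem.List.pyRange 0 stride 1).map (fun k => base + fix + k))

-- Python's xs[i] for a negative in-range index
theorem pv_pyGet?_neg {α : Type} (xs : List α) (i : Int) (h0 : -(xs.length : Int) ≤ i) (h1 : i < 0) :
    PySem.List.pyGet? xs i = some (xs[(i + xs.length).toNat]'(by omega)) := by
  simp only [PySem.List.pyGet?, PySem.List.pyIdx?, if_neg (by omega : ¬ (0:Int) ≤ i), if_pos h0,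
    Option.bind_some]
  rw [List.getElem?_eq_getElem (by omega)]
  have : xs.length - (-i).toNat = (i + xs.length).toNat := by omega
  exact congrArg some (by simp [this])

-- the invariant of compute_strides' downward loop: entering iteration m-1, every slot from m on
-- already holds its suffix product, and the remaining iterations fill the slots below m
theorem fold_inv (sizes : List Int) (m : Nat) : ∀ (st : List Int), st.length = sizes.length →
    m ≤ sizes.length →
    (∀ j, m ≤ j → j < sizes.length → st.getD j 1 = (sizes.drop (j+1)).prod) →
    ((PySem.List.pyRange ((m : Int) - 1) (-1) (-1)).foldl
      (fun st i =>
        PySem.List.pySetD st i (PySem.List.pyGetD st (i + 1) 1 * PySem.List.pyGetD sizes (i + 1) 1))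
      st) = (List.range sizes.length).map (fun j => (sizes.drop (j+1)).prod) := by
  induction m with
  | zero =>
    intro st hlen hm hst
    rw [PySem.List.pyRange_neg_one_eq_nil (by omega), List.foldl_nil]
    apply List.ext_getElem (by simp [hlen])
    intro j hj1 hj2
    have := hst j (Nat.zero_le _) (by omega)
    rw [List.getElem_map, List.getElem_range]
    rw [List.getD_eq_getElem st 1 hj1] at this
    exact this
  | succ m ih =>
    intro st hlen hm hst
    have hcast : ((m+1 : Nat) : Int) - 1 = (m : Int) := by push_cast; ring
    rw [hcast, PySem.List.pyRange_neg_one_cons (by omega), List.foldl_cons]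
    have hmlt : m < st.length := by omega
    apply ih
    · simp [hlen]
    · omega
    · intro j hj hjn
      have h1 : ((m : Int) + 1) = ((m + 1 : Nat) : Int) := by push_cast; ring
      rw [h1, PySem.List.pySetD_natCast, PySem.List.pyGetD_natCast, PySem.List.pyGetD_natCast]
      rcases Nat.eq_or_lt_of_le hj with rfl | hjm
      · -- j = m : the newly set value
        rw [List.getD_eq_getElem _ 1 (by simpa [hlen] using hjn), List.getElem_set_self (by simpa using hmlt)]
        by_cases hend : m + 1 < sizes.length
        · rw [hst (m+1) (by omega) hend, List.getD_eq_getElem _ 1 (by omega),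
            List.drop_eq_getElem_cons hend, List.prod_cons]
          ring
        · have he : sizes.length = m + 1 := by omega
          rw [List.getD_eq_default _ _ (by omega), List.getD_eq_default _ _ (by omega)]
          simp [List.drop_eq_nil_of_le (by omega : sizes.length ≤ m + 1)]
      · -- j > m : untouched
        rw [List.getD_eq_getElem _ 1 (by simpa [hlen] using hjn),
          List.getElem_set_ne (by omega), ← List.getD_eq_getElem st 1 (by omega)]
        exact hst j (by omega) hjn

theorem compute_strides_spec (sizes : List Int) :
    compute_strides sizes = (List.range sizes.length).map (fun j => (sizes.drop (j + 1)).prod) := by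
  show (PySem.List.pyRange ((sizes.length : Int) - 2) (-1) (-1)).foldl _ (List.replicate sizes.length 1) = _
  rcases Nat.eq_zero_or_pos sizes.length with h0 | hpos
  · rw [h0, PySem.List.pyRange_neg_one_eq_nil (by omega), List.foldl_nil]
    simp
  · have hcast : ((sizes.length : Int)) - 2 = ((sizes.length - 1 : Nat) : Int) - 1 := by omega
    rw [hcast]
    apply fold_inv sizes (sizes.length - 1) _ (by simp) (by omega)
    intro j hj hjn
    have hj' : j = sizes.length - 1 := by omega
    rw [List.getD_eq_getElem _ 1 (by simp; omega), List.getElem_replicate]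
    rw [hj']
    rw [List.drop_eq_nil_of_le (by omega), List.prod_nil]

-- ceiling division: -((-t) // p) = (t + p - 1) / p for positive p, t
theorem pv_ceil_pos (t p : Int) (hp : 0 < p) (ht : 0 < t) :
    -PySem.Int.floordiv (-t) p = (t + p - 1) / p := by
  have e1 : p * ((t + p - 1) / p) + (t + p - 1) % p = t + p - 1 := Int.ediv_add_emod _ _
  have e2 : 0 ≤ (t + p - 1) % p := Int.emod_nonneg _ (by omega)
  have e3 : (t + p - 1) % p < p := Int.emod_lt_of_pos _ hp
  exact (PySem.Int.neg_floordiv_neg_eq_iff_of_pos hp).mpr ⟨by nlinarith, by nlinarith⟩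

-- range(0, t, p) is range(ceil(t/p)) scaled by p, for either sign of p
theorem pv_range_step (t p : Int) (hp : p ≠ 0) :
    PySem.List.pyRange 0 t p =
      (PySem.List.pyRange 0 (-(PySem.Int.floordiv (-t) p)) 1).map (fun j => j * p) := by
  rw [PySem.List.pyRange_one, List.map_map, Int.sub_zero]
  rcases lt_or_gt_of_ne hp with hneg | hpos
  · rw [PySem.List.pyRange_of_neg 0 t hneg]
    have hsw : PySem.Int.floordiv (-t) p = PySem.Int.floordiv t (-p) := by
      have := PySem.Int.floordiv_neg_neg t (-p)
      simpa using this
    rcases lt_or_ge t 0 with ht | ht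
    · rw [if_pos (by omega)]
      have hq : -PySem.Int.floordiv (-t) p = (-t + -p - 1) / (-p) := by
        rw [hsw]
        have := pv_ceil_pos (-t) (-p) (by omega) (by omega)
        simpa using this
      rw [hq]
      have : ((0 : Int) - t + -p - 1) = (-t + -p - 1) := by ring
      rw [this]
      exact List.map_congr_left (fun k _ => by simp; ring)
    · rw [if_neg (by omega)]
      have hq : -PySem.Int.floordiv (-t) p ≤ 0 := by
        rw [hsw, PySem.Int.floordiv_eq_ediv_of_pos (by omega)]
        have := Int.ediv_nonneg (a := t) (b := -p) (by omega) (by omega)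
        omega
      rw [Int.toNat_of_nonpos hq]
      simp
  · rw [PySem.List.pyRange_of_pos 0 t hpos]
    rcases lt_or_ge 0 t with ht | ht
    · rw [if_pos ht]
      rw [pv_ceil_pos t p hpos ht]
      have : (t - 0 + p - 1) = (t + p - 1) := by ring
      rw [this]
      exact List.map_congr_left (fun k _ => by simp; ring)
    · rw [if_neg (by omega)]
      have hq : -PySem.Int.floordiv (-t) p ≤ 0 := by
        rw [PySem.Int.floordiv_eq_ediv_of_pos hpos]
        have := Int.ediv_nonneg (a := -t) (b := p) (by omega) (by omega)
        omega
      rw [Int.toNat_of_nonpos hq]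
      simp

-- A's value in pvShape form, for any in-range (possibly negative) agent_idx
theorem A_char (agent_idx sample_idx : Int) (sizes : List Int)
    (h0 : -(sizes.length : Int) ≤ agent_idx) (h1 : agent_idx < (sizes.length : Int)) :
    agent_sample_rollouts agent_idx sample_idx sizes =
      (let i := (if agent_idx < 0 then agent_idx + sizes.length else agent_idx).toNat
       let stride := (sizes.drop (i + 1)).prod
       pvShape sizes.prod ((sizes[i]'(by omega)) * stride) stride (sample_idx * stride)) := by
  have hi : (if agent_idx < 0 then agent_idx + (sizes.length : Int) else agent_idx).toNat < sizes.length := by omega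
  set i := (if agent_idx < 0 then agent_idx + (sizes.length : Int) else agent_idx).toNat with hidef
  show (PySem.List.pyRange 0 sizes.prod
      ((PySem.List.pyGet? sizes agent_idx).getD 0 * (PySem.List.pyGet? (compute_strides sizes) agent_idx).getD 0)).foldl _ [] = _
  have hlenstr : (compute_strides sizes).length = sizes.length := by
    rw [compute_strides_spec]; simp
  have hstr : (PySem.List.pyGet? (compute_strides sizes) agent_idx).getD 0 = (sizes.drop (i + 1)).prod := by
    rcases lt_or_ge agent_idx 0 with hneg | hnn
    · rw [pv_pyGet?_neg _ _ (by omega) hneg, Option.getD_some]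
      simp only [compute_strides_spec, List.getElem_map, List.getElem_range, List.length_map]
      congr 2
      simp [hidef, if_pos hneg]
    · rw [PySem.List.pyGet?_eq_some_getElem _ hnn (by omega), Option.getD_some]
      simp only [compute_strides_spec, List.getElem_map, List.getElem_range]
      congr 2
      simp [hidef, if_neg (by omega : ¬ agent_idx < 0)]
  have hsz : (PySem.List.pyGet? sizes agent_idx).getD 0 = sizes[i]'hi := by
    rcases lt_or_ge agent_idx 0 with hneg | hnn
    · rw [pv_pyGet?_neg _ _ h0 hneg, Option.getD_some]
      congr 1
      simp [hidef, if_pos hneg]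
    · rw [PySem.List.pyGet?_eq_some_getElem _ hnn h1, Option.getD_some]
      congr 1
      simp [hidef, if_neg (by omega : ¬ agent_idx < 0)]
  rw [hstr, hsz]
  simp only [PySem.List.foldl_append_singleton_eq_map, PySem.List.foldl_append_eq_flatMap, List.nil_append]
  rfl

-- products of nonnegative integer lists are nonnegative / positive
theorem pv_prod_nonneg (l : List Int) (h : ∀ x ∈ l, 0 ≤ x) : 0 ≤ l.prod := by
  induction l with
  | nil => simp
  | cons a t ih =>
    rw [List.prod_cons]
    exact mul_nonneg (h a (by simp)) (ih (fun x hx => h x (by simp [hx])))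

-- mixed-radix block fusion: enumerating c then q covers range(sq*p) exactly once, in order
theorem pv_blocks (sq p : Int) (hs : 0 ≤ sq) (hp : 0 ≤ p) (f : Int → List Int) :
    (PySem.List.pyRange 0 sq 1).flatMap
        (fun c => (PySem.List.pyRange 0 p 1).flatMap (fun q => f (c * p + q)))
      = (PySem.List.pyRange 0 (sq * p) 1).flatMap f := by
  obtain ⟨m, rfl⟩ : ∃ m : Nat, sq = (m : Int) := ⟨sq.toNat, (Int.toNat_of_nonneg hs).symm⟩
  induction m with
  | zero =>
    rw [Nat.cast_zero, zero_mul, PySem.List.pyRange_one_eq_nil (a := 0) (b := 0) (by omega)]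
    simp
  | succ k ih =>
    have hk : (0 : Int) ≤ (k : Int) := by positivity
    rw [Nat.cast_succ, PySem.List.pyRange_one_succ_right hk, List.flatMap_append,
      ih hk]
    have hsplit : ((k : Int) + 1) * p = (k : Int) * p + p := by ring
    rw [hsplit, PySem.List.pyRange_one_append 0 ((k : Int) * p) ((k : Int) * p + p)
      (by positivity) (by linarith), List.flatMap_append]
    congr 1
    simp only [List.flatMap_cons, List.flatMap_nil, List.append_nil, PySem.List.pyRange_one,
      List.flatMap_map]
    have harg : ((k : Int) * p + p - (k : Int) * p) = p - 0 := by ring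
    rw [harg]
    simp only [zero_add]


-- unfolding lemmas for pvEmit
theorem pvEmit_lt (s : Int) (axes : List (Option Int)) (sizes : List Int) (j : Nat) (acc : Int)
    (hj : j < sizes.length) :
    pvEmit s axes sizes j acc =
      (pvAxisList (axes.getD j (some 0)) s).flatMap
        (fun c => pvEmit s axes sizes (j + 1) (acc + c * (sizes.drop (j + 1)).prod)) := by
  rw [pvEmit]
  have hsl : PySem.List.slice sizes (some ((j : Int) + 1)) = sizes.drop (j + 1) := by
    have : ((j : Int) + 1) = ((j + 1 : Nat) : Int) := by push_cast; ring
    rw [this, PySem.List.slice_from_natCast]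
  simp only [dif_pos hj, hsl]

theorem pvEmit_ge (s : Int) (axes : List (Option Int)) (sizes : List Int) (j : Nat) (acc : Int)
    (hj : ¬ j < sizes.length) :
    pvEmit s axes sizes j acc = [acc] := by
  rw [pvEmit]
  simp only [dif_neg hj]

-- derived block fusion for a map body
theorem pv_R (sz p acc : Int) (hs : 0 ≤ sz) (hp : 0 ≤ p) :
    (PySem.List.pyRange 0 sz 1).flatMap
        (fun c => (PySem.List.pyRange 0 p 1).map (fun k => acc + c * p + k))
      = (PySem.List.pyRange 0 (sz * p) 1).map (fun k => acc + k) := by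
  have h1 : ∀ (b : Int) (r : List Int), r.map (fun k => b + k) = r.flatMap (fun k => [b + k]) := by
    intro b r
    induction r with
    | nil => simp
    | cons x t ih => simp [ih]
  rw [h1 acc]
  have h2 : (fun c => (PySem.List.pyRange 0 p 1).map (fun k => acc + c * p + k))
      = (fun c => (PySem.List.pyRange 0 p 1).flatMap (fun q => [acc + (c * p + q)])) := by
    funext c
    rw [h1 (acc + c * p)]
    congr 1
    funext q
    rw [add_assoc]
  rw [h2]
  exact pv_blocks sz p hs hp (fun x => [acc + x])

-- DFS over plain-range axes only: pvEmit from j enumerates a contiguous block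
theorem pv_emitS (s : Int) (axes : List (Option Int)) (sizes : List Int) :
    ∀ (m j : Nat) (acc : Int), sizes.length - j ≤ m →
      (∀ (t : Nat) (ht : t < sizes.length), j ≤ t →
        pvAxisList (axes.getD t (some 0)) s = PySem.List.pyRange 0 (sizes[t]'ht) 1) →
      (∀ x ∈ sizes.drop j, 0 ≤ x) →
      pvEmit s axes sizes j acc =
        (PySem.List.pyRange 0 ((sizes.drop j).prod) 1).map (fun k => acc + k) := by
  intro m
  induction m with
  | zero =>
    intro j acc hm hax hnn
    rw [pvEmit_ge s axes sizes j acc (by omega), List.drop_eq_nil_of_le (by omega), List.prod_nil]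
    simp [PySem.List.pyRange_one]
  | succ m ih =>
    intro j acc hm hax hnn
    by_cases hj : j < sizes.length
    · rw [pvEmit_lt s axes sizes j acc hj, hax j hj (le_refl j)]
      have hd : sizes.drop j = sizes[j] :: sizes.drop (j + 1) := List.drop_eq_getElem_cons hj
      have hnn' : ∀ x ∈ sizes.drop (j + 1), 0 ≤ x := by
        intro x hx
        exact hnn x (by rw [hd]; exact List.mem_cons_of_mem _ hx)
      have hsj : (0 : Int) ≤ sizes[j] := hnn _ (by rw [hd]; exact List.mem_cons_self)
      have hrec : ∀ c : Int,
          pvEmit s axes sizes (j + 1) (acc + c * (sizes.drop (j + 1)).prod)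
            = (PySem.List.pyRange 0 ((sizes.drop (j + 1)).prod) 1).map
                (fun k => acc + c * (sizes.drop (j + 1)).prod + k) :=
        fun c => ih (j + 1) _ (by omega) (fun t ht htj => hax t ht (by omega)) hnn'
      simp only [hrec]
      rw [pv_R _ _ _ hsj (pv_prod_nonneg _ hnn'), hd, List.prod_cons]
    · rw [pvEmit_ge s axes sizes j acc hj, List.drop_eq_nil_of_le (by omega), List.prod_nil]
      simp [PySem.List.pyRange_one]

-- DFS before/at the agent axis: pvEmit from j ≤ iN is the outer-by-inner block list
theorem pv_emitP (s : Int) (axes : List (Option Int)) (sizes : List Int) (iN : Nat)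
    (hiN : iN < sizes.length)
    (hpre : ∀ x ∈ sizes.take iN, 0 ≤ x) (hsuf : ∀ x ∈ sizes.drop (iN + 1), 0 ≤ x)
    (hax : ∀ (t : Nat) (ht : t < sizes.length),
      pvAxisList (axes.getD t (some 0)) s
        = if t = iN then [s] else PySem.List.pyRange 0 (sizes[t]'ht) 1) :
    ∀ (m j : Nat) (acc : Int), iN - j ≤ m → j ≤ iN →
      pvEmit s axes sizes j acc =
        (PySem.List.pyRange 0 (((sizes.drop j).take (iN - j)).prod) 1).flatMap
          (fun q => (PySem.List.pyRange 0 ((sizes.drop (iN + 1)).prod) 1).map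
            (fun k => acc + q * ((sizes.drop iN).prod) + s * ((sizes.drop (iN + 1)).prod) + k)) := by
  intro m
  induction m with
  | zero =>
    intro j acc hm hji
    have hj : j = iN := by omega
    subst hj
    rw [pvEmit_lt s axes sizes j acc (by omega), hax j (by omega), if_pos rfl]
    simp only [List.flatMap_cons, List.flatMap_nil, List.append_nil]
    rw [pv_emitS s axes sizes sizes.length (j + 1) _ (by omega)
      (fun t ht htj => by rw [hax t ht, if_neg (by omega)]) hsuf]
    simp only [Nat.sub_self, List.take_zero, List.prod_nil]
    rw [show PySem.List.pyRange 0 1 1 = [0] from rfl]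
    simp only [List.flatMap_cons, List.flatMap_nil, List.append_nil, zero_mul, add_zero]
  | succ m ih =>
    intro j acc hm hji
    by_cases hje : j = iN
    · subst hje
      rw [pvEmit_lt s axes sizes j acc (by omega), hax j (by omega), if_pos rfl]
      simp only [List.flatMap_cons, List.flatMap_nil, List.append_nil]
      rw [pv_emitS s axes sizes sizes.length (j + 1) _ (by omega)
        (fun t ht htj => by rw [hax t ht, if_neg (by omega)]) hsuf]
      simp only [Nat.sub_self, List.take_zero, List.prod_nil]
      rw [show PySem.List.pyRange 0 1 1 = [0] from rfl]
      simp only [List.flatMap_cons, List.flatMap_nil, List.append_nil, zero_mul, add_zero]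
    · have hjlt : j < iN := by omega
      have hjsz : j < sizes.length := by omega
      rw [pvEmit_lt s axes sizes j acc hjsz, hax j hjsz, if_neg hje]
      -- the suffix product at j+1 factors through the agent block
      have hdd : (sizes.drop (j + 1)).drop (iN - (j + 1)) = sizes.drop iN := by
        rw [List.drop_drop]
        congr 1
        omega
      have hst : (sizes.drop (j + 1)).prod
          = ((sizes.drop (j + 1)).take (iN - (j + 1))).prod * (sizes.drop iN).prod := by
        conv_lhs => rw [← List.take_append_drop (iN - (j + 1)) (sizes.drop (j + 1))]
        rw [List.prod_append, hdd]
      have hrec : ∀ c : Int,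
          pvEmit s axes sizes (j + 1) (acc + c * (sizes.drop (j + 1)).prod)
            = (PySem.List.pyRange 0 (((sizes.drop (j + 1)).take (iN - (j + 1))).prod) 1).flatMap
                (fun q => (PySem.List.pyRange 0 ((sizes.drop (iN + 1)).prod) 1).map
                  (fun k => (acc + c * (sizes.drop (j + 1)).prod) + q * ((sizes.drop iN).prod)
                    + s * ((sizes.drop (iN + 1)).prod) + k)) :=
        fun c => ih (j + 1) _ (by omega) (by omega)
      simp only [hrec]
      have hQ' : (0 : Int) ≤ ((sizes.drop (j + 1)).take (iN - (j + 1))).prod :=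
        pv_prod_nonneg _ (fun x hx =>
          hpre x (List.mem_of_mem_drop (by rw [List.drop_take]; exact hx)))
      have hsj : (0 : Int) ≤ sizes[j] := by
        have h1 : (sizes.take iN)[j]'(by simp; omega) = sizes[j] := List.getElem_take
        exact h1 ▸ hpre _ (List.getElem_mem _)
      have hfe : (fun c => (PySem.List.pyRange 0 (((sizes.drop (j + 1)).take (iN - (j + 1))).prod) 1).flatMap
                (fun q => (PySem.List.pyRange 0 ((sizes.drop (iN + 1)).prod) 1).map
                  (fun k => (acc + c * (sizes.drop (j + 1)).prod) + q * ((sizes.drop iN).prod)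
                    + s * ((sizes.drop (iN + 1)).prod) + k)))
          = (fun c => (PySem.List.pyRange 0 (((sizes.drop (j + 1)).take (iN - (j + 1))).prod) 1).flatMap
                (fun q => (fun x => (PySem.List.pyRange 0 ((sizes.drop (iN + 1)).prod) 1).map
                  (fun k => acc + x * ((sizes.drop iN).prod)
                    + s * ((sizes.drop (iN + 1)).prod) + k))
                  (c * ((sizes.drop (j + 1)).take (iN - (j + 1))).prod + q))) := by
        funext c
        congr 1
        funext q
        congr 1
        funext k
        rw [hst]
        ring
      rw [hfe]
      rw [pv_blocks (sizes[j]'hjsz) (((sizes.drop (j + 1)).take (iN - (j + 1))).prod) hsj hQ'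
        (fun x => (PySem.List.pyRange 0 ((sizes.drop (iN + 1)).prod) 1).map
          (fun k => acc + x * ((sizes.drop iN).prod) + s * ((sizes.drop (iN + 1)).prod) + k))]
      have hQj : sizes[j] * ((sizes.drop (j + 1)).take (iN - (j + 1))).prod
          = ((sizes.drop j).take (iN - j)).prod := by
        have hd : sizes.drop j = sizes[j] :: sizes.drop (j + 1) := List.drop_eq_getElem_cons hjsz
        rw [hd, show iN - j = (iN - (j + 1)) + 1 by omega, List.take_succ_cons, List.prod_cons]
      rw [hQj]

-- exact division: the outer block count -((-(Q*p)) // p) is Q itself, for either sign of p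
theorem pv_nb_exact (q p : Int) (hp : p ≠ 0) : -(PySem.Int.floordiv (-(q * p)) p) = q := by
  rcases lt_or_gt_of_ne hp with hneg | hpos
  · have h1 : PySem.Int.floordiv (-(q * p)) p = PySem.Int.floordiv (q * p) (-p) := by
      have := PySem.Int.floordiv_neg_neg (q * p) (-p)
      simpa using this
    rw [h1, PySem.Int.floordiv_eq_ediv_of_pos (by omega), show q * p = (-q) * (-p) by ring,
      Int.mul_ediv_cancel _ (by omega)]
    ring
  · rw [PySem.Int.floordiv_eq_ediv_of_pos hpos, ← neg_mul, Int.mul_ediv_cancel _ (by omega)]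
    ring

-- A returns [] whenever the inner block length is negative or the outer block count is ≤ 0
theorem pv_A_empty (ai si : Int) (sizes : List Int)
    (h0 : -(sizes.length : Int) ≤ ai) (h1 : ai < (sizes.length : Int))
    (hper : (sizes.drop ((if ai < 0 then ai + sizes.length else ai).toNat)).prod ≠ 0)
    (hA : (sizes.drop ((if ai < 0 then ai + sizes.length else ai).toNat + 1)).prod < 0 ∨
      (sizes.take ((if ai < 0 then ai + sizes.length else ai).toNat)).prod ≤ 0) :
    agent_sample_rollouts ai si sizes = [] := by
  rw [A_char ai si sizes h0 h1]
  set iN := (if ai < 0 then ai + (sizes.length : Int) else ai).toNat with hidef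
  have hiN : iN < sizes.length := by omega
  simp only [pvShape]
  rcases hA with hstr | hQ
  · rw [PySem.List.pyRange_one_eq_nil (a := 0) (b := (sizes.drop (iN + 1)).prod) (by omega)]
    simp
  · have hperiod : sizes[iN] * (sizes.drop (iN + 1)).prod = (sizes.drop iN).prod := by
      rw [List.drop_eq_getElem_cons hiN, List.prod_cons]
    have htotal : sizes.prod = (sizes.take iN).prod * (sizes[iN] * (sizes.drop (iN + 1)).prod) := by
      conv_lhs => rw [← List.take_append_drop iN sizes]
      rw [List.prod_append, hperiod]
    have hne : sizes[iN] * (sizes.drop (iN + 1)).prod ≠ 0 := by rw [hperiod]; exact hper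
    rw [htotal, pv_range_step ((sizes.take iN).prod * (sizes[iN] * (sizes.drop (iN + 1)).prod))
      (sizes[iN] * (sizes.drop (iN + 1)).prod) hne, pv_nb_exact _ _ hne,
      PySem.List.pyRange_one_eq_nil (a := 0) (b := (sizes.take iN).prod) (by omega)]
    simp

-- Python's xs[i] = v for an in-range (possibly negative) index
theorem pv_pySetD_inrange {α : Type} (xs : List α) (i : Int) (v : α)
    (h0 : -(xs.length : Int) ≤ i) (h1 : i < (xs.length : Int)) :
    PySem.List.pySetD xs i v = xs.set ((if i < 0 then i + xs.length else i).toNat) v := by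
  rcases lt_or_ge i 0 with hneg | hnn
  · simp only [PySem.List.pySetD, PySem.List.pySet?, PySem.List.pyIdx?,
      if_neg (by omega : ¬ (0:Int) ≤ i), if_pos h0, Option.map_some, Option.getD_some,
      if_pos hneg]
    congr 1
    omega
  · simp only [PySem.List.pySetD, PySem.List.pySet?, PySem.List.pyIdx?,
      if_pos hnn, if_pos h1, Option.map_some, Option.getD_some,
      if_neg (by omega : ¬ i < 0)]

-- ===== VERDICT (by name: the statement is the Claim_ definition above) =====
theorem agent_sample_rollouts_spec : Claim_equal_agent_sample_rollouts := by
  intro ai si sizes _ hpre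
  obtain ⟨h0, h1, hper, hdis⟩ := hpre
  unfold Spec_agent_sample_rollouts
  set iN := (if ai < 0 then ai + (sizes.length : Int) else ai).toNat with hidef
  have hiN : iN < sizes.length := by omega
  have hsetd : PySem.List.pySetD (sizes.map (fun s => some s)) ai (none : Option Int)
      = (sizes.map (fun s => some s)).set iN none := by
    rw [pv_pySetD_inrange _ _ _ (by simp; omega) (by simp; omega)]
    simp only [List.length_map]
    rw [← hidef]
  have haxopt : ∀ (t : Nat) (ht : t < sizes.length),
      ((PySem.List.pySetD (sizes.map (fun s => some s)) ai (none : Option Int)).getD t (some 0))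
        = if t = iN then none else some (sizes[t]'ht) := by
    intro t ht
    rw [hsetd]
    rw [List.getD_eq_getElem _ _ (by simp [ht])]
    by_cases hti : t = iN
    · subst hti
      rw [List.getElem_set_self (by simp; omega), if_pos rfl]
    · rw [List.getElem_set_ne (by omega), List.getElem_map, if_neg hti]
  have hax : ∀ (t : Nat) (ht : t < sizes.length),
      pvAxisList ((PySem.List.pySetD (sizes.map (fun s => some s)) ai (none : Option Int)).getD t (some 0)) si
        = if t = iN then [si] else PySem.List.pyRange 0 (sizes[t]'ht) 1 := by
    intro t ht
    rw [haxopt t ht]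
    by_cases hti : t = iN
    · rw [if_pos hti, if_pos hti]
      rfl
    · rw [if_neg hti, if_neg hti]
      rfl
  have hlen2 : (PySem.List.pySetD (sizes.map (fun s => some s)) ai (none : Option Int)).length
      = sizes.length := by
    rw [hsetd]
    simp
  cases hg : (PySem.List.pySetD (sizes.map (fun s => some s)) ai (none : Option Int)).any pvAxisEmpty with
  | true =>
    -- some axis is empty: B short-circuits to [], and the sign conditions force A to []
    have hB : agent_sample_rollouts_alt ai si sizes = [] := by
      show (if (PySem.List.pySetD (sizes.map (fun s => some s)) ai (none : Option Int)).any pvAxisEmpty = true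
        then ([] : List Int)
        else pvEmit si (PySem.List.pySetD (sizes.map (fun s => some s)) ai none) sizes 0 0) = []
      rw [if_pos hg]
    obtain ⟨a, ha, hae⟩ := List.any_eq_true.mp hg
    obtain ⟨t, ht, rfl⟩ := List.getElem_of_mem ha
    have ht' : t < sizes.length := by omega
    have htg : (PySem.List.pySetD (sizes.map (fun s => some s)) ai (none : Option Int))[t]
        = (PySem.List.pySetD (sizes.map (fun s => some s)) ai (none : Option Int)).getD t (some 0) :=
      (List.getD_eq_getElem _ _ ht).symm
    rw [htg, haxopt t ht'] at hae
    have htne : t ≠ iN := by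
      intro hcon
      rw [if_pos hcon] at hae
      simp [pvAxisEmpty] at hae
    rw [if_neg htne] at hae
    have hts : sizes[t]'ht' ≤ 0 := by simpa [pvAxisEmpty] using hae
    have hA : (sizes.drop (iN + 1)).prod < 0 ∨ (sizes.take iN).prod ≤ 0 := by
      rcases hdis with hall | h | h
      · -- every non-agent size nonnegative, so the empty axis has size exactly 0
        have hts0 : sizes[t]'ht' = 0 := by
          have := hall t (by rw [List.mem_range]; omega) htne
          rw [List.getD_eq_getElem _ 1 ht'] at this
          omega
        rcases lt_or_ge t iN with hti | hti
        · -- the zero sits before the agent: the outer block count is 0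
          right
          have hmemtake : (0 : Int) ∈ sizes.take iN := by
            rw [← hts0]
            have h1 : (sizes.take iN)[t]'(by simp; omega) = sizes[t]'ht' := List.getElem_take
            rw [← h1]
            exact List.getElem_mem _
          rw [List.prod_eq_zero hmemtake]
        · -- the zero sits after the agent: contradicts the nonzero agent-block product
          exfalso
          have hti2 : iN + 1 ≤ t := by omega
          have hmemdrop : (0 : Int) ∈ sizes.drop iN := by
            rw [← hts0]
            have h1 : (sizes.drop iN)[t - iN]'(by simp; omega) = sizes[iN + (t - iN)]'(by omega) :=
              List.getElem_drop
            have h2 : iN + (t - iN) = t := by omega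
            simp only [h2] at h1
            rw [← h1]
            exact List.getElem_mem _
          exact hper (List.prod_eq_zero hmemdrop)
      · exact Or.inl h
      · exact Or.inr h
    rw [pv_A_empty ai si sizes h0 h1 hper hA, hB]
  | false =>
    -- no axis is empty: every non-agent size is positive and the block lists coincide
    have hall : ∀ idx ∈ List.range sizes.length, idx ≠ iN → 0 ≤ sizes.getD idx 1 := by
      intro idx hmem hne
      rw [List.mem_range] at hmem
      rw [List.getD_eq_getElem _ 1 hmem]
      by_contra hcon
      have hemp : pvAxisEmpty ((PySem.List.pySetD (sizes.map (fun s => some s)) ai (none : Option Int)).getD idx (some 0))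
          = true := by
        rw [haxopt idx hmem, if_neg hne]
        simp [pvAxisEmpty]
        omega
      have hmem2 : ((PySem.List.pySetD (sizes.map (fun s => some s)) ai (none : Option Int)).getD idx (some 0))
          ∈ PySem.List.pySetD (sizes.map (fun s => some s)) ai (none : Option Int) := by
        rw [List.getD_eq_getElem _ _ (by omega)]
        exact List.getElem_mem _
      have : (PySem.List.pySetD (sizes.map (fun s => some s)) ai (none : Option Int)).any pvAxisEmpty = true :=
        List.any_eq_true.mpr ⟨_, hmem2, hemp⟩
      rw [hg] at this
      exact Bool.false_ne_true this
    have hpre' : ∀ x ∈ sizes.take iN, 0 ≤ x := by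
      intro x hx
      obtain ⟨t, ht, rfl⟩ := List.getElem_of_mem hx
      have ht' : t < iN := by simp at ht; omega
      have h1 : (sizes.take iN)[t]'ht = sizes[t]'(by omega) := List.getElem_take
      rw [h1]
      have := hall t (by rw [List.mem_range]; omega) (by omega)
      rwa [List.getD_eq_getElem _ 1 (by omega)] at this
    have hsuf' : ∀ x ∈ sizes.drop (iN + 1), 0 ≤ x := by
      intro x hx
      obtain ⟨t, ht, rfl⟩ := List.getElem_of_mem hx
      have h1 : (sizes.drop (iN + 1))[t]'ht = sizes[iN + 1 + t]'(by simp at ht; omega) :=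
        List.getElem_drop
      rw [h1]
      have := hall (iN + 1 + t) (by rw [List.mem_range]; simp at ht; omega) (by omega)
      rwa [List.getD_eq_getElem _ 1 (by simp at ht; omega)] at this
    have hB : agent_sample_rollouts_alt ai si sizes
        = (PySem.List.pyRange 0 ((sizes.take iN).prod) 1).flatMap
            (fun q => (PySem.List.pyRange 0 ((sizes.drop (iN + 1)).prod) 1).map
              (fun k => 0 + q * ((sizes.drop iN).prod) + si * ((sizes.drop (iN + 1)).prod) + k)) := by
      show (if (PySem.List.pySetD (sizes.map (fun s => some s)) ai (none : Option Int)).any pvAxisEmpty = true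
        then ([] : List Int)
        else pvEmit si (PySem.List.pySetD (sizes.map (fun s => some s)) ai none) sizes 0 0) = _
      rw [hg, if_neg (by simp)]
      rw [pv_emitP si _ sizes iN hiN hpre' hsuf' hax iN 0 0 (by omega) (by omega)]
      simp only [List.drop_zero, Nat.sub_zero]
    rw [A_char ai si sizes h0 h1, hB]
    simp only [← hidef, pvShape]
    have hperiod : sizes[iN] * (sizes.drop (iN + 1)).prod = (sizes.drop iN).prod := by
      rw [List.drop_eq_getElem_cons hiN, List.prod_cons]
    have htotal : sizes.prod = (sizes.take iN).prod * (sizes.drop iN).prod := by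
      conv_lhs => rw [← List.take_append_drop iN sizes]
      rw [List.prod_append]
    have hnb : -(PySem.Int.floordiv (-(sizes.prod)) (sizes[iN] * (sizes.drop (iN + 1)).prod))
        = (sizes.take iN).prod := by
      rw [hperiod, htotal]
      exact pv_nb_exact _ _ hper
    rw [pv_range_step sizes.prod (sizes[iN]'hiN * (sizes.drop (iN + 1)).prod)
      (by rw [hperiod]; exact hper), hnb, List.flatMap_map]
    simp only [hperiod, zero_add]
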